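-- pv_equiv track=rewrite | github.com/cichian/AXI_Pmesh | tests/byte_enable.py | byte_enable
-- ===== SOURCE A (Python) =====
-- def byte_enable (address, data, strobe):
--     scale = 10
--     num_of_bits = 64
--     data_bin = list(bin(int(data))[2:].zfill(num_of_bits))
--     strb_bin = list(bin(int(strobe))[2:].zfill(8))
--     for strb_index in range (8):
--         for data_index in range (8):
--             if strb_bin[strb_index] == '0':
--                 data_bin[(8*strb_index) + data_index] = 0
--             else:
--                 if data_bin[(8*strb_index) + data_index] == '1':
--                     data_bin[(8*strb_index) + data_index] = 1
--                 else:
--                     data_bin[(8*strb_index) + data_index] = 0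
--
--     return binatodeci(data_bin) >> ((address % 8)*8) # need shift for data alighment purpose
--
-- def binatodeci(binary):
--     return sum(val*(2**idx) for idx, val in enumerate(reversed(binary)))
-- ===== SOURCE B (Python) =====
-- def byte_enable(address, data, strobe):
--     data_bin = bin(int(data))[2:].zfill(64)
--     strb_bin = bin(int(strobe))[2:].zfill(8)
--     out = 0
--     for i in range(64):
--         out = out * 2 + (1 if strb_bin[i // 8] != '0' and data_bin[i] == '1' else 0)
--     return out >> ((address % 8) * 8)
-- ===== Notes on version B (the rewrite author's own statement) =====
-- stated objective: simpler
-- what changed: Fuses A's three phases (build char lists, nested 8x8 in-place masking loop, separate reversed power-sum decoder binatodeci) into one MSB-first Horner accumulation over the 64 bit positions, with no intermediate list mutation and no helper.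
import Mathlib
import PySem

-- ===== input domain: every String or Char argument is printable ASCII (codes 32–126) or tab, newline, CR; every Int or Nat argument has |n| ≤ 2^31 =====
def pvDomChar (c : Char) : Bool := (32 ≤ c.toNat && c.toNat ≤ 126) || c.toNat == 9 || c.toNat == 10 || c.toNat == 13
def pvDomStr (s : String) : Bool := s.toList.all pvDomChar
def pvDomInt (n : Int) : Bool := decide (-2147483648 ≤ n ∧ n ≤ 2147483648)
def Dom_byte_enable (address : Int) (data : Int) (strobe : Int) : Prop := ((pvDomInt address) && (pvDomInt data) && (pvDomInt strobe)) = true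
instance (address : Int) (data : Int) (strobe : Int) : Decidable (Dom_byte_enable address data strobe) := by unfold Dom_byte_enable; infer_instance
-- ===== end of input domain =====

-- B fuses A's three phases (char lists, nested 8x8 in-place masking, reversed power-sum
-- decoder) into one MSB-first Horner pass over the 64 bit positions (objective: simpler).

-- ===== PORT A =====
-- bin(int(data))[2:]: PySem.Int.toBinChars0b is bin(); [2:] with nonnegative start is List.drop 2.
-- str.zfill(w): left-pad with '0' to width w (exact for the '0'..'9','b','-' chars bin produces).
def zfill (l : List Char) (w : Nat) : List Char := List.replicate (w - l.length) '0' ++ l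

-- binatodeci: sum(val*(2**idx) for idx, val in enumerate(reversed(binary))).  After A's loop the
-- Python list holds ints 0/1; the heterogeneous list is modelled as chars, '1' ↔ 1 and '0' ↔ 0.
def binatodeci (binary : List Char) : Int :=
  ((PySem.List.enumerate binary.reverse 0).map
    (fun p => (if p.2 = '1' then (1 : Int) else 0) * 2 ^ p.1.toNat)).sum

-- int(data)/int(strobe) are the ints themselves.  List indices come from range(8) so they are
-- nonnegative and in range: reads are .getD, writes .set (exact there).  x >> k is Int >>>.
def byte_enable (address : Int) (data : Int) (strobe : Int) : Int :=
  let num_of_bits := 64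
  let data_bin := zfill ((PySem.Int.toBinChars0b data).drop 2) num_of_bits
  let strb_bin := zfill ((PySem.Int.toBinChars0b strobe).drop 2) 8
  let data_bin := (List.range 8).foldl (fun db strb_index =>
    (List.range 8).foldl (fun db data_index =>
      if strb_bin.getD strb_index ' ' = '0' then
        db.set (8 * strb_index + data_index) '0'
      else if db.getD (8 * strb_index + data_index) ' ' = '1' then
        db.set (8 * strb_index + data_index) '1'
      else
        db.set (8 * strb_index + data_index) '0') db) data_bin
  binatodeci data_bin >>> ((PySem.Int.mod address 8) * 8).toNat

-- ===== PORT B =====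
def byte_enable_alt (address : Int) (data : Int) (strobe : Int) : Int :=
  let data_bin := zfill ((PySem.Int.toBinChars0b data).drop 2) 64
  let strb_bin := zfill ((PySem.Int.toBinChars0b strobe).drop 2) 8
  let out : Int := (List.range 64).foldl (fun out i =>
    out * 2 + (if strb_bin.getD (i / 8) ' ' ≠ '0' ∧ data_bin.getD i ' ' = '1' then 1 else 0)) 0
  out >>> ((PySem.Int.mod address 8) * 8).toNat

-- ===== PRECONDITION & SPEC =====
def Spec_byte_enable (address : Int) (data : Int) (strobe : Int) (out : Int) : Prop := out = byte_enable_alt address data strobe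
instance (address : Int) (data : Int) (strobe : Int) (out : Int) : Decidable (Spec_byte_enable address data strobe out) := by unfold Spec_byte_enable; infer_instance

-- ===== CLAIM (what is proved, stated in full; the proofs are below) =====
def Claim_equal_byte_enable : Prop := ∀ (address : Int) (data : Int) (strobe : Int), Dom_byte_enable address data strobe → Spec_byte_enable address data strobe (byte_enable address data strobe)

-- ===== LEMMAS AND PROOFS =====

-- length of A's and B's shared 64-char data string
lemma length_data_bin (z : Int) (h : z.natAbs ≤ 2 ^ 31) :
    (zfill ((PySem.Int.toBinChars0b z).drop 2) 64).length = 64 := by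
  have hpow : (2 : Nat) ^ 31 < 2 ^ 32 := by norm_num
  have hdig : (Nat.toDigits 2 z.natAbs).length ≤ 32 :=
    Nat.toDigits_length 2 z.natAbs 32 (by norm_num) (by omega)
  unfold zfill
  rw [List.length_append, List.length_replicate]
  by_cases hz : z < 0
  · have hdrop : (PySem.Int.toBinChars0b z).drop 2 = 'b' :: Nat.toDigits 2 z.natAbs := by
      simp [PySem.Int.toBinChars0b, hz]
    rw [hdrop]
    simp only [List.length_cons]
    omega
  · have hdrop : (PySem.Int.toBinChars0b z).drop 2 = Nat.toDigits 2 z.toNat := by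
      simp [PySem.Int.toBinChars0b, hz]
    have htn : z.toNat = z.natAbs := by omega
    rw [hdrop, htn]
    omega

-- partial sums of binatodeci's enumerate
lemma sum_enumerate_pow (cs : List Char) : ∀ (s : Nat),
    ((PySem.List.enumerate cs (s : Int)).map
      (fun p => (if p.2 = '1' then (1 : Int) else 0) * 2 ^ p.1.toNat)).sum
    = ∑ i ∈ Finset.range cs.length, (if cs.getD i ' ' = '1' then (1 : Int) else 0) * 2 ^ (s + i) := by
  induction cs with
  | nil => simp [PySem.List.enumerate_nil]
  | cons c cs ih =>
    intro s
    rw [PySem.List.enumerate_cons, List.map_cons, List.sum_cons]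
    have hcast : ((s : Int) + 1) = ((s + 1 : Nat) : Int) := by push_cast; ring
    rw [hcast, ih (s + 1), List.length_cons, Finset.sum_range_succ']
    simp only [List.getD_cons_succ, List.getD_cons_zero, Int.toNat_natCast]
    have h2 : ∀ i, s + 1 + i = s + (i + 1) := by omega
    simp only [h2]
    ring

lemma binatodeci_eq_sum (l : List Char) :
    binatodeci l = ∑ i ∈ Finset.range l.length,
      (if l.getD (l.length - 1 - i) ' ' = '1' then (1 : Int) else 0) * 2 ^ i := by
  have h := sum_enumerate_pow l.reverse 0
  simp only [Nat.cast_zero, Nat.zero_add, zero_add] at h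
  rw [binatodeci, h, List.length_reverse]
  refine Finset.sum_congr rfl (fun i hi => ?_)
  rw [Finset.mem_range] at hi
  rw [List.getD_eq_getElem?_getD, List.getD_eq_getElem?_getD,
    List.getElem?_eq_getElem (by simpa using hi), List.getElem?_eq_getElem (by omega),
    List.getElem_reverse]

-- the double loop, flattened over a single index
lemma flatten_loop (h : Nat → Nat → List Char → List Char) (db0 : List Char) :
    (List.range 8).foldl (fun db si => (List.range 8).foldl (fun db di => h si (8 * si + di) db) db) db0
      = (List.range 64).foldl (fun db j => h (j / 8) j db) db0 := by
  simp [List.range_succ]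

-- a left-to-right loop that reads index j and writes index j
lemma foldl_set_getD (F : Nat → Char → Char) (N : Nat) (db0 : List Char) :
    (((List.range N).foldl (fun db j => db.set j (F j (db.getD j ' '))) db0).length = db0.length)
    ∧ (∀ j, ((List.range N).foldl (fun db j => db.set j (F j (db.getD j ' '))) db0).getD j ' '
        = if j < N ∧ j < db0.length then F j (db0.getD j ' ') else db0.getD j ' ') := by
  induction N with
  | zero => simp
  | succ N ih =>
    rw [List.range_succ, List.foldl_append, List.foldl_cons, List.foldl_nil]
    obtain ⟨ihlen, ihget⟩ := ih
    have hread : ((List.range N).foldl (fun db j => db.set j (F j (db.getD j ' '))) db0).getD N ' '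
        = db0.getD N ' ' := by
      rw [ihget N]
      simp
    constructor
    · rw [List.length_set, ihlen]
    · intro j
      rw [List.getD_eq_getElem?_getD, List.getElem?_set, hread]
      by_cases hjN : N = j
      · subst hjN
        rw [if_pos rfl]
        by_cases hlt : N < db0.length
        · rw [if_pos (by rw [ihlen]; exact hlt)]
          simp only [Option.getD_some]
          rw [if_pos ⟨by omega, hlt⟩]
        · rw [if_neg (by rw [ihlen]; exact hlt)]
          simp only [Option.getD_none]
          rw [if_neg (by omega), List.getD_eq_getElem?_getD,
            List.getElem?_eq_none (by omega)]
          rfl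
      · rw [if_neg hjN, ← List.getD_eq_getElem?_getD, ihget j]
        by_cases hj : j < N ∧ j < db0.length
        · rw [if_pos hj, if_pos ⟨by omega, hj.2⟩]
        · rw [if_neg hj, if_neg (by omega)]

-- B's Horner accumulation as a power sum
lemma horner_sum (e : Nat → Int) (N : Nat) :
    (List.range N).foldl (fun out i => out * 2 + e i) 0
      = ∑ j ∈ Finset.range N, e j * 2 ^ (N - 1 - j) := by
  induction N with
  | zero => simp
  | succ N ih =>
    rw [List.range_succ, List.foldl_append, List.foldl_cons, List.foldl_nil, ih,
      Finset.sum_range_succ, Finset.sum_mul]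
    have h1 : ∀ j ∈ Finset.range N, e j * 2 ^ (N - 1 - j) * 2 = e j * 2 ^ (N + 1 - 1 - j) := by
      intro j hj
      rw [Finset.mem_range] at hj
      rw [mul_assoc, ← pow_succ]
      congr 2
      omega
    rw [Finset.sum_congr rfl h1]
    simp

-- the fused pass computes exactly the decoded masked string
lemma sums_eq (strb db0 : List Char) (hlen : db0.length = 64) :
    binatodeci ((List.range 64).foldl (fun db j => db.set j
      ((fun (j : Nat) (c : Char) =>
        if strb.getD (j / 8) ' ' = '0' then '0'
        else if c = '1' then '1' else '0') j (db.getD j ' '))) db0)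
    = (List.range 64).foldl (fun out i =>
        out * 2 + (if strb.getD (i / 8) ' ' ≠ '0' ∧ db0.getD i ' ' = '1' then (1 : Int) else 0)) 0 := by
  obtain ⟨hflen, hfget⟩ := foldl_set_getD (fun (j : Nat) (c : Char) =>
      if strb.getD (j / 8) ' ' = '0' then '0'
      else if c = '1' then '1' else '0') 64 db0
  have hhorn := horner_sum (fun i =>
      (if strb.getD (i / 8) ' ' ≠ '0' ∧ db0.getD i ' ' = '1' then (1 : Int) else 0)) 64
  beta_reduce at hhorn
  rw [binatodeci_eq_sum, hflen, hlen, hhorn]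
  conv_rhs => rw [← Finset.sum_range_reflect]
  refine Finset.sum_congr rfl (fun i hi => ?_)
  rw [Finset.mem_range] at hi
  have hcond : 64 - 1 - i < 64 ∧ 64 - 1 - i < db0.length := ⟨by omega, by omega⟩
  rw [hfget (64 - 1 - i), if_pos hcond]
  beta_reduce
  have hexp : 64 - 1 - (64 - 1 - i) = i := by omega
  rw [hexp]
  by_cases hsc : strb.getD ((64 - 1 - i) / 8) ' ' = '0'
  · rw [if_pos hsc, if_neg (show ¬('0' : Char) = '1' by decide),
      if_neg (show ¬(strb.getD ((64 - 1 - i) / 8) ' ' ≠ '0' ∧ db0.getD (64 - 1 - i) ' ' = '1')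
        from fun h => h.1 hsc)]
  · rw [if_neg hsc]
    by_cases hc : db0.getD (64 - 1 - i) ' ' = '1'
    · rw [if_pos hc, if_pos (show ('1' : Char) = '1' from rfl), if_pos ⟨hsc, hc⟩]
    · rw [if_neg hc, if_neg (show ¬('0' : Char) = '1' by decide),
        if_neg (show ¬(strb.getD ((64 - 1 - i) / 8) ' ' ≠ '0' ∧ db0.getD (64 - 1 - i) ' ' = '1')
          from fun h => hc h.2)]

-- ===== VERDICT (by name: the statement is the Claim_ definition above) =====
theorem byte_enable_spec : Claim_equal_byte_enable := by
  intro address data strobe hdom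
  unfold Spec_byte_enable
  unfold Dom_byte_enable at hdom
  simp only [pvDomInt, Bool.and_eq_true, decide_eq_true_eq] at hdom
  have habs : data.natAbs ≤ 2 ^ 31 := by
    have h31 : (2 : Nat) ^ 31 = 2147483648 := by norm_num
    omega
  simp only [byte_enable, byte_enable_alt]
  have hdlen := length_data_bin data habs
  have hflat := flatten_loop (fun si j db =>
      if (zfill ((PySem.Int.toBinChars0b strobe).drop 2) 8).getD si ' ' = '0' then db.set j '0'
      else if db.getD j ' ' = '1' then db.set j '1' else db.set j '0')
    (zfill ((PySem.Int.toBinChars0b data).drop 2) 64)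
  beta_reduce at hflat
  rw [hflat]
  have hfun : (fun (db : List Char) (j : Nat) =>
      if (zfill ((PySem.Int.toBinChars0b strobe).drop 2) 8).getD (j / 8) ' ' = '0' then db.set j '0'
      else if db.getD j ' ' = '1' then db.set j '1' else db.set j '0')
      = (fun (db : List Char) (j : Nat) => db.set j
        ((fun (j : Nat) (c : Char) =>
          if (zfill ((PySem.Int.toBinChars0b strobe).drop 2) 8).getD (j / 8) ' ' = '0' then '0'
          else if c = '1' then '1' else '0') j (db.getD j ' '))) := by
    funext db j
    beta_reduce
    split_ifs <;> rfl
  rw [hfun, sums_eq _ _ hdlen]
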